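-- pv_equiv track=rewrite | github.com/nabhpatodi10/Research-AI | backend/graph_modules/visualization_modules/mermaid.py | _has_label_newlines
-- ===== SOURCE A (Python) =====
-- def _has_label_newlines(content: str) -> bool:
--     """Return True if any double-quoted label string contains a literal newline.
--
--     A real newline inside a quoted mermaid label (e.g. ``["line1\nline2"]``) terminates
--     the lexer token and causes a parse error.  The correct multiline syntax is ``<br/>``.
--     """
--     in_double_quote = False
--     escaped = False
--     for char in str(content or ""):
--         if escaped:
--             escaped = False
--             continue
--         if char == "\\":
--             escaped = True
--             continue
--         if char == '"':
--             in_double_quote = not in_double_quote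
--             continue
--         if in_double_quote and char in ("\n", "\r"):
--             return True
--     return False
-- ===== SOURCE B (Python) =====
-- def _has_label_newlines(content: str) -> bool:
--     """Two-phase rewrite: strip escape pairs, split on '"', check odd segments."""
--     s = str(content or "")
--     # phase 1: delete backslash-escape pairs so they cannot affect quote nesting
--     cleaned = []
--     it = iter(s)
--     for ch in it:
--         if ch == '\\':
--             next(it, None)  # drop the escaped character too
--         else:
--             cleaned.append(ch)
--     # phase 2: split the cleaned text on '"'; odd-indexed pieces lie inside quotes
--     done = []
--     cur = []
--     for ch in cleaned:
--         if ch == '"':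
--             done.append(cur)
--             cur = []
--         else:
--             cur.append(ch)
--     segments = done + [cur]
--     return any(('\n' in seg) or ('\r' in seg) for seg in segments[1::2])
-- ===== Notes on version B (the rewrite author's own statement) =====
-- stated objective: alternative
-- what changed: Replaces A's single stateful scan (escaped/in-quote flags with early return) by a two-phase pipeline: first strip all backslash-escape pairs, then split the cleaned text on the double-quote character and test the odd-indexed (inside-quote) segments for a literal newline or carriage return.
import Mathlib
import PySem

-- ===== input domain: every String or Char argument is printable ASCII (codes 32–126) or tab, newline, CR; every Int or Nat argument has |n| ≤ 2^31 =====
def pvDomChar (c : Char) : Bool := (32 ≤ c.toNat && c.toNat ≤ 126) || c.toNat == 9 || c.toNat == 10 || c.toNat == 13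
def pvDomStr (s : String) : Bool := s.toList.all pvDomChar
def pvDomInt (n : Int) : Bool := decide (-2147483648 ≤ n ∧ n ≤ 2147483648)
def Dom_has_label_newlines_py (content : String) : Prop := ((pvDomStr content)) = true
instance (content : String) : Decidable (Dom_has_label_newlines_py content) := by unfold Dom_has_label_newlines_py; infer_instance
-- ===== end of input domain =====

-- B replaces A's single stateful scan by a two-phase pipeline (strip escape pairs, split on the
-- double-quote character, test odd-indexed segments); an alternative decomposition, not claimed faster.

-- ===== PORT A =====
def hlnLoop : List Char → Bool → Bool → Bool
  | [], _, _ => false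
  | c :: rest, inq, escaped =>
    if escaped then hlnLoop rest inq false
    else if c = '\\' then hlnLoop rest inq true
    else if c = '"' then hlnLoop rest (!inq) escaped
    else if inq && (c = '\n' || c = '\r') then true
    else hlnLoop rest inq escaped

def has_label_newlines_py (content : String) : Bool :=
  -- str(content or "") on a string argument: content if nonempty else ""
  hlnLoop (if content = "" then "" else content).toList false false

-- ===== PORT B =====
-- phase 1: the iterator loop deleting backslash-escape pairs (next(it, None) consumes the escaped char)
def stripEsc : List Char → List Char
  | [] => []
  | [c] => if c = '\\' then [] else [c]
  | c :: d :: rest => if c = '\\' then stripEsc rest else c :: stripEsc (d :: rest)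

-- phase 2 loop body: state = (done, cur)
def splitStep (st : List (List Char) × List Char) (ch : Char) : List (List Char) × List Char :=
  if ch = '"' then (st.1 ++ [st.2], []) else (st.1, st.2 ++ [ch])

def anyNl (seg : List Char) : Bool := seg.contains '\n' || seg.contains '\r'

-- exact hand port of segments[1::2]: every second element starting at index 1
def oddSegs : List (List Char) → List (List Char)
  | [] => []
  | [_] => []
  | _ :: b :: rest => b :: oddSegs rest

def has_label_newlines_py_alt (content : String) : Bool :=
  let s := if content = "" then "" else content
  let cleaned := stripEsc s.toList
  let st := cleaned.foldl splitStep ([], [])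
  let segments := st.1 ++ [st.2]
  (oddSegs segments).any anyNl

-- ===== PRECONDITION & SPEC =====
def Spec_has_label_newlines_py (content : String) (out : Bool) : Prop := out = has_label_newlines_py_alt content
instance (content : String) (out : Bool) : Decidable (Spec_has_label_newlines_py content out) := by unfold Spec_has_label_newlines_py; infer_instance

-- ===== CLAIM (what is proved, stated in full; the proofs are below) =====
def Claim_equal_has_label_newlines_py : Prop := ∀ (content : String), Dom_has_label_newlines_py content → Spec_has_label_newlines_py content (has_label_newlines_py content)

-- ===== LEMMAS AND PROOFS =====

-- spec-level run of A after escape pairs are removed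
def gRun : List Char → Bool → Bool
  | [], _ => false
  | c :: rest, q =>
    if c = '"' then gRun rest (!q)
    else if q && (c = '\n' || c = '\r') then true
    else gRun rest q

-- recursive characterisation of splitting on '"'
def splitQ : List Char → List (List Char)
  | [] => [[]]
  | c :: r => if c = '"' then [] :: splitQ r
              else (c :: (splitQ r).headI) :: (splitQ r).tail

-- alternating-parity check over segments
def chk : Bool → List (List Char) → Bool
  | _, [] => false
  | q, s :: rest => (q && anyNl s) || chk (!q) rest

lemma splitQ_ne_nil (cs : List Char) : splitQ cs ≠ [] := by
  cases cs <;> simp [splitQ] <;> split <;> simp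

lemma cons_headI_tail {α : Type} [Inhabited α] (l : List α) (h : l ≠ []) :
    l.headI :: l.tail = l := by cases l <;> simp_all

lemma splitQ_eq_cons (cs : List Char) :
    splitQ cs = (splitQ cs).headI :: (splitQ cs).tail :=
  (cons_headI_tail _ (splitQ_ne_nil cs)).symm

lemma hlnLoop_eq_gRun (l : List Char) (q : Bool) :
    hlnLoop l q false = gRun (stripEsc l) q := by
  induction l using stripEsc.induct generalizing q with
  | case1 => simp [hlnLoop, stripEsc, gRun]
  | case2 => simp [hlnLoop, stripEsc, gRun]
  | case3 c hc =>
    by_cases hq : c = '"'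
    · simp [hlnLoop, stripEsc, gRun, hc, hq]
    · simp [hlnLoop, stripEsc, gRun, hc, hq]
  | case4 d rest ih => simp [hlnLoop, stripEsc, ih]
  | case5 c d rest hc ih =>
    by_cases hq : c = '"'
    · rw [show hlnLoop (c :: d :: rest) q false = hlnLoop (d :: rest) (!q) false by
            simp [hlnLoop, hc, hq],
          ih,
          show stripEsc (c :: d :: rest) = c :: stripEsc (d :: rest) by simp [stripEsc, hc]]
      simp [gRun, hq]
    · rw [show hlnLoop (c :: d :: rest) q false
            = (if q && (c = '\n' || c = '\r') then true else hlnLoop (d :: rest) q false) by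
            simp [hlnLoop, hc, hq],
          show stripEsc (c :: d :: rest) = c :: stripEsc (d :: rest) by simp [stripEsc, hc],
          show gRun (c :: stripEsc (d :: rest)) q
            = (if q && (c = '\n' || c = '\r') then true else gRun (stripEsc (d :: rest)) q) by
            simp [gRun, hq],
          ih]

lemma anyNl_cons (c : Char) (h : List Char) :
    anyNl (c :: h) = ((c = '\n' || c = '\r') || anyNl h) := by
  by_cases h1 : c = '\n' <;> by_cases h2 : c = '\r' <;>
    simp [anyNl, h1, h2, eq_comm]

lemma gRun_eq_chk (cs : List Char) (q : Bool) :
    gRun cs q = chk q (splitQ cs) := by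
  induction cs generalizing q with
  | nil => simp [gRun, splitQ, chk, anyNl]
  | cons c r ih =>
    by_cases hq : c = '"'
    · simp [gRun, splitQ, chk, hq, anyNl, ih]
    · rw [show splitQ (c :: r) = (c :: (splitQ r).headI) :: (splitQ r).tail by
        simp [splitQ, hq]]
      have hr := splitQ_eq_cons r
      have hchk : chk q (splitQ r) = ((q && anyNl (splitQ r).headI) || chk (!q) (splitQ r).tail) := by
        rw [hr]; rfl
      rw [show gRun (c :: r) q
            = (if q && (c = '\n' || c = '\r') then true else gRun r q) by
          simp [gRun, hq]]
      rw [ih, hchk]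
      show _ = ((q && anyNl (c :: (splitQ r).headI)) || _)
      rw [anyNl_cons]
      cases q <;> by_cases h1 : c = '\n' <;> by_cases h2 : c = '\r' <;>
        simp [h1, h2]

lemma chk_false_eq_oddSegs (segs : List (List Char)) :
    chk false segs = (oddSegs segs).any anyNl := by
  induction segs using oddSegs.induct with
  | case1 => simp [chk, oddSegs]
  | case2 s => simp [chk, oddSegs]
  | case3 s t r ih => simp [chk, oddSegs, ih]

lemma foldl_splitStep (cs : List Char) (done : List (List Char)) (cur : List Char) :
    (cs.foldl splitStep (done, cur)).1 ++ [(cs.foldl splitStep (done, cur)).2]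
      = done ++ ((cur ++ (splitQ cs).headI) :: (splitQ cs).tail) := by
  induction cs generalizing done cur with
  | nil => simp [splitQ]
  | cons c r ih =>
    by_cases hq : c = '"'
    · rw [show (c :: r).foldl splitStep (done, cur) = r.foldl splitStep (done ++ [cur], []) by
        simp [List.foldl, splitStep, hq]]
      rw [ih, show splitQ (c :: r) = [] :: splitQ r by simp [splitQ, hq]]
      simp
      rw [← splitQ_eq_cons r]
    · rw [show (c :: r).foldl splitStep (done, cur) = r.foldl splitStep (done, cur ++ [c]) by
        simp [List.foldl, splitStep, hq]]
      rw [ih, show splitQ (c :: r) = (c :: (splitQ r).headI) :: (splitQ r).tail by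
        simp [splitQ, hq]]
      simp

lemma foldl_splitStep_nil (cs : List Char) :
    (cs.foldl splitStep ([], [])).1 ++ [(cs.foldl splitStep ([], [])).2] = splitQ cs := by
  rw [foldl_splitStep]
  simpa using (splitQ_eq_cons cs).symm

lemma alt_eq (content : String) :
    has_label_newlines_py_alt content
      = chk false (splitQ (stripEsc (if content = "" then "" else content).toList)) := by
  show (oddSegs ((List.foldl splitStep ([], [])
          (stripEsc (if content = "" then "" else content).toList)).1 ++
        [(List.foldl splitStep ([], [])
          (stripEsc (if content = "" then "" else content).toList)).2])).any anyNl = _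
  rw [foldl_splitStep_nil, ← chk_false_eq_oddSegs]

-- ===== VERDICT (by name: the statement is the Claim_ definition above) =====
theorem has_label_newlines_py_spec : Claim_equal_has_label_newlines_py := by
  intro content _
  unfold Spec_has_label_newlines_py
  rw [alt_eq]
  unfold has_label_newlines_py
  rw [hlnLoop_eq_gRun, gRun_eq_chk]
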